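-- pv_equiv track=rewrite | github.com/wbattistetti/Omnia | newBackend/api/api_openapi_proxy.py | _pathname_prefixes
-- ===== SOURCE A (Python) =====
-- def _pathname_prefixes(pathname: str) -> list[str]:
--     """Percorsi dal path completo fino ai segmenti padre (es. /api/v1/users → /api/v1/users, /api/v1, /api)."""
--     if not pathname or pathname == "/":
--         return []
--     parts = [p for p in pathname.split("/") if p]
--     if not parts:
--         return []
--     out: list[str] = []
--     for i in range(len(parts), 0, -1):
--         out.append("/" + "/".join(parts[:i]))
--     return out
-- ===== SOURCE B (Python) =====
-- def _pathname_prefixes(pathname: str) -> list[str]: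
--     """Percorsi dal path completo fino ai segmenti padre (es. /api/v1/users → /api/v1/users, /api/v1, /api)."""
--     if not pathname or pathname == "/":
--         return []
--     acc: list[str] = []
--     cur = ""
--     for p in pathname.split("/"):
--         if p:
--             cur = cur + "/" + p
--             acc.append(cur)
--     acc.reverse()
--     return acc
-- ===== Notes on version B (the rewrite author's own statement) =====
-- stated objective: simpler
-- what changed: B replaces the index loop that re-slices parts[:i] and re-joins each prefix with a single forward pass that grows one accumulator string segment by segment (appending each prefix, then reversing), so no slicing or joining per index remains.
import Mathlib
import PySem

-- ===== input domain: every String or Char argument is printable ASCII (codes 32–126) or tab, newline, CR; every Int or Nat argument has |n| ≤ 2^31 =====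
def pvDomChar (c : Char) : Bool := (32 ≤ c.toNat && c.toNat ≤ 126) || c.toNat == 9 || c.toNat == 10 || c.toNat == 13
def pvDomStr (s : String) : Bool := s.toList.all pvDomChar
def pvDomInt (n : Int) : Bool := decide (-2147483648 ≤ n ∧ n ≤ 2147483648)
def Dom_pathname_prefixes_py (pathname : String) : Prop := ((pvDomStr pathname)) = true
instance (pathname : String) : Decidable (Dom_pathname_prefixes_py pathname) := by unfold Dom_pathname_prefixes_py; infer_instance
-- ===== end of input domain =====

-- B builds each prefix by growing one accumulator string in a single forward pass (then reversing),
-- instead of A's index loop that re-slices parts[:i] and re-joins per index. Objective: simpler.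

-- ===== PORT A =====
def pathname_prefixes_py (pathname : String) : List String :=
  if pathname = "" || pathname = "/" then []
  else
    let parts := (PySem.Chars.splitOn pathname.toList ['/']).filter (fun p => !p.isEmpty)
    if parts.isEmpty then []
    else
      (PySem.List.pyRange (parts.length : Int) 0 (-1)).foldl
        (fun out i =>
          out ++ [String.ofList ('/' :: PySem.Chars.join ['/'] (PySem.List.slice parts none (some i)))])
        []

-- ===== PORT B =====
def pathname_prefixes_py_alt (pathname : String) : List String :=
  if pathname = "" || pathname = "/" then []
  else
    let st := (PySem.Chars.splitOn pathname.toList ['/']).foldl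
      (fun (st : List (List Char) × List Char) p =>
        if p.isEmpty then st
        else
          let cur := st.2 ++ '/' :: p
          (st.1 ++ [cur], cur))
      ([], [])
    (st.1.reverse).map String.ofList

-- ===== PRECONDITION & SPEC =====
def Spec_pathname_prefixes_py (pathname : String) (out : List String) : Prop := out = pathname_prefixes_py_alt pathname
instance (pathname : String) (out : List String) : Decidable (Spec_pathname_prefixes_py pathname out) := by unfold Spec_pathname_prefixes_py; infer_instance

-- ===== CLAIM (what is proved, stated in full; the proofs are below) =====
def Claim_equal_pathname_prefixes_py : Prop := ∀ (pathname : String), Dom_pathname_prefixes_py pathname → Spec_pathname_prefixes_py pathname (pathname_prefixes_py pathname)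

-- ===== LEMMAS AND PROOFS =====

/-- The segment-wise prefix: each segment contributes '/' followed by itself. -/
def pvPref (qs : List (List Char)) : List Char := qs.flatMap (fun q => '/' :: q)

theorem pvPref_nil : pvPref [] = [] := rfl

theorem pvPref_cons (q : List Char) (qs : List (List Char)) :
    pvPref (q :: qs) = '/' :: q ++ pvPref qs := by simp [pvPref]

/-- For a nonempty segment list, '/' ++ join '/' qs is exactly pvPref qs. -/
theorem pvJoin_eq_pref (q : List Char) (qs : List (List Char)) :
    '/' :: PySem.Chars.join ['/'] (q :: qs) = pvPref (q :: qs) := by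
  induction qs generalizing q with
  | nil => simp [pvPref, PySem.Chars.join_singleton]
  | cons r rs ih =>
      rw [PySem.Chars.join_cons_cons, pvPref_cons]
      have := ih r
      simp only [List.cons_append, List.append_assoc] at *
      simp [this]

/-- B's fold invariant: folding the step over segments appends the list of growing prefixes. -/
theorem pvFold_spec (ps : List (List Char)) :
    ∀ (acc : List (List Char)) (cur : List Char),
      ps.foldl
        (fun (st : List (List Char) × List Char) p =>
          let c := st.2 ++ '/' :: p; (st.1 ++ [c], c))
        (acc, cur)
      = (acc ++ (List.range ps.length).map (fun k => cur ++ pvPref (ps.take (k + 1))),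
         cur ++ pvPref ps) := by
  induction ps with
  | nil => intro acc cur; simp [pvPref]
  | cons p ps ih =>
      intro acc cur
      simp only [List.foldl_cons]
      rw [ih]
      simp only [Prod.mk.injEq]
      refine ⟨?_, by simp [pvPref_cons]⟩
      rw [List.length_cons, List.range_succ_eq_map]
      simp [pvPref_cons, pvPref_nil, List.map_map, Function.comp_def]

theorem pathname_prefixes_eq (pathname : String) :
    pathname_prefixes_py pathname = pathname_prefixes_py_alt pathname := by
  unfold pathname_prefixes_py pathname_prefixes_py_alt
  by_cases hg : (pathname = "" || pathname = "/") = true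
  · simp [hg]
  · simp only [hg, if_false, Bool.false_eq_true]
    set parts := (PySem.Chars.splitOn pathname.toList ['/']).filter (fun p => !p.isEmpty) with hparts
    -- B's fold skips empty segments, i.e. folds over `parts`
    have hB : (PySem.Chars.splitOn pathname.toList ['/']).foldl
        (fun (st : List (List Char) × List Char) p =>
          if p.isEmpty then st
          else let c := st.2 ++ '/' :: p; (st.1 ++ [c], c))
        ([], [])
      = parts.foldl
        (fun (st : List (List Char) × List Char) p =>
          let c := st.2 ++ '/' :: p; (st.1 ++ [c], c))
        ([], []) := by
      rw [hparts, List.foldl_filter]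
      congr 1
      funext st q
      by_cases hq : q.isEmpty <;> simp [hq]
    rw [hB, pvFold_spec]
    by_cases hp : parts.isEmpty
    · simp [List.isEmpty_iff.mp hp]
    · simp only [hp, if_false, Bool.false_eq_true]
      -- A's loop is a reversed map over i = 1..n
      rw [PySem.List.foldl_append_singleton_eq_map
        (fun i => String.ofList ('/' :: PySem.Chars.join ['/'] (PySem.List.slice parts none (some i)))),
        PySem.List.pyRange_neg_one_eq_reverse, PySem.List.pyRange_one]
      rw [show (((parts.length : Int)) + 1 - (0 + 1)).toNat = parts.length from by omega]
      simp only [List.nil_append, List.map_reverse, List.map_map]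
      congr 1
      apply List.map_congr_left
      intro k hk
      have hk' : k < parts.length := List.mem_range.mp hk
      simp only [Function.comp_apply]
      rw [show (0 : Int) + 1 + (k : Int) = ((k + 1 : Nat) : Int) by push_cast; ring,
        PySem.List.slice_to_natCast]
      obtain ⟨q, qs, hqqs⟩ : ∃ q qs, parts.take (k + 1) = q :: qs := by
        rcases parts with _ | ⟨q, qs⟩
        · simp at hk'
        · exact ⟨q, (qs.take k), by simp⟩
      rw [hqqs, ← pvJoin_eq_pref, ← hqqs]

-- ===== VERDICT (by name: the statement is the Claim_ definition above) =====
theorem pathname_prefixes_py_spec : Claim_equal_pathname_prefixes_py := by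
  intro pathname _
  unfold Spec_pathname_prefixes_py
  exact pathname_prefixes_eq pathname
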